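-- pv_equiv track=rewrite | github.com/contrust/dns-server | entities/dns_message.py | decompress_four_bytes
-- ===== SOURCE A (Python) =====
-- def decompress_four_bytes(four_bytes: str, message: str) -> str:
--     if len(four_bytes) != 4:
--         return four_bytes
--     start = int(four_bytes[-3:], 16) * 2
--     end = start
--     for i in range(1, (len(message) - start) // 2 + 1):
--         if message[start + i * 2: start + i * 2 + 2] == "00":
--             end = start + i * 2
--             break
--         if message[start + i * 2] == "c":
--             end = start + i * 2 + 4
--             break
--     result = message[start: end]
--     if result[-4] == "c":
--         result = (message[start: end - 4] +
--                   decompress_four_bytes(message[end - 4: end], message))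
--     return result
-- ===== SOURCE B (Python) =====
-- def decompress_four_bytes(four_bytes: str, message: str) -> str:
--     acc = ""
--     current = four_bytes
--     while len(current) == 4:
--         start = int(current[-3:], 16) * 2
--         pos = start + 2
--         while pos < len(message) and message[pos:pos + 2] != "00" and message[pos] != "c":
--             pos += 2
--         end = pos + 4 if pos < len(message) and message[pos] == "c" else pos
--         result = message[start:end]
--         if result[-4] != "c":
--             return acc + result
--         acc += message[start:end - 4]
--         current = message[end - 4:end]
--     return acc + current
-- ===== Notes on version B (the rewrite author's own statement) =====
-- stated objective: alternative
-- what changed: A's pointer-following recursion becomes a single iterative chase loop with an accumulator string (A's per-call len(token)!=4 guard becomes the loop condition), and the counted range(1,(len-start)//2+1) scan becomes a step-by-2 while-walk over positions with explicit stop conditions.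
-- outside the precondition, e.g. on decompress_four_bytes('c000', 'ee12340000cghh'): A returns 'ee1234', B returns 'ee1234'; on decompress_four_bytes('c001', 'aabbc004eedd00'): A returns 'bbeedd', B returns 'bbeedd'; on decompress_four_bytes('c-02', '91bfc'): A returns '1bfc', B returns '1bfc'
import Mathlib
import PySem

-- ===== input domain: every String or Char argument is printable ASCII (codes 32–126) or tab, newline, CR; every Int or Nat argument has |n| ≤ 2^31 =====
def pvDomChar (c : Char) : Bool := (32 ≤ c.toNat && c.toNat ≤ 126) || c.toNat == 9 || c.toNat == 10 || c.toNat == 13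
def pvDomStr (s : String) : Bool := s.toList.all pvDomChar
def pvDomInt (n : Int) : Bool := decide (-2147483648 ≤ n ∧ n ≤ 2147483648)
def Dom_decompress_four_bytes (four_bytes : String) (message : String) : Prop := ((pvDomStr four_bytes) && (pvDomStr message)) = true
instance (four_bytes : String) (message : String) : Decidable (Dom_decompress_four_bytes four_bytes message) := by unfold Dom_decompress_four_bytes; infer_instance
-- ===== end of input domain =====

-- B rewrites A's pointer-following recursion as an iterative chase loop with an accumulator
-- (the token-length test becomes the loop condition), and replaces A's counted
-- range(1, (len-start)//2 + 1) scan by a step-by-2 while-walk over positions.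

-- ===== PORT A =====
-- the for-loop over range(1, (len(message)-start)//2 + 1) with its two breaks; returns the final `end`
-- (when Python raises IndexError at message[start+i*2] the port returns `start`; those inputs are outside Pre_)
def pvScanA (cs : List Char) (start : Int) : List Int → Int
  | [] => start
  | i :: rest =>
    if PySem.List.slice cs (some (start + i * 2)) (some (start + i * 2 + 2)) = ['0', '0'] then
      start + i * 2
    else
      match PySem.List.pyGet? cs (start + i * 2) with
      | none => start            -- Python raises IndexError here (excluded by Pre_)
      | some c =>
        if c = 'c' then start + i * 2 + 4
        else pvScanA cs start rest

-- one evaluation of A's body; `rec` is the recursive call (transliteration of A's code)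
def pvDecompStep (rec : String → String) (four_bytes message : String) : String :=
  if PySem.Str.len four_bytes ≠ 4 then four_bytes
  else
    match PySem.Int.ofStrBase? (PySem.Str.slice four_bytes (some (-3)) none) 16 with
    | none => ""               -- Python raises ValueError (excluded by Pre_)
    | some v =>
      let start : Int := v * 2
      let cs := message.toList
      let e := pvScanA cs start
        (PySem.List.pyRange 1 (PySem.Int.floordiv ((cs.length : Int) - start) 2 + 1) 1)
      let result := PySem.List.slice cs (some start) (some e)
      match PySem.List.pyGet? result (-4) with
      | none => ""             -- Python raises IndexError (excluded by Pre_)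
      | some ch =>
        if ch = 'c' then
          String.ofList (PySem.List.slice cs (some start) (some (e - 4)))
            ++ rec (String.ofList (PySem.List.slice cs (some (e - 4)) (some e)))
        else String.ofList result

-- fuel bounds the recursion depth only; inside Pre_ the chained pointer offsets strictly
-- decrease from at most 0xfff, so depth ≤ 4097 and fuel 0 is never reached there
def pvDecompA : Nat → String → String → String
  | 0, _, _ => ""
  | fuel + 1, four_bytes, message =>
    pvDecompStep (fun token => pvDecompA fuel token message) four_bytes message

def decompress_four_bytes (four_bytes : String) (message : String) : String :=
  pvDecompA 4097 four_bytes message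

-- ===== PORT B =====
-- the inner `while pos < len(message) and message[pos:pos+2] != "00" and message[pos] != "c": pos += 2`
def pvScanB (cs : List Char) (pos : Int) : Int :=
  if h : pos < (cs.length : Int) ∧
      PySem.List.slice cs (some pos) (some (pos + 2)) ≠ ['0', '0'] ∧
      PySem.List.pyGet? cs pos ≠ some 'c' then
    pvScanB cs (pos + 2)
  else pos
termination_by ((cs.length : Int) - pos).toNat
decreasing_by
  have := h.1; omega

-- one iteration of B's `while len(current) == 4` loop; `acc` is the accumulator,
-- `rec` is the next iteration (taking the updated acc and current)
def pvChaseStep (rec : List Char → String → String)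
    (cs : List Char) (acc : List Char) (tok : String) : String :=
  if PySem.Str.len tok ≠ 4 then String.ofList (acc ++ tok.toList)  -- loop exit: return acc + current
  else
    match PySem.Int.ofStrBase? (PySem.Str.slice tok (some (-3)) none) 16 with
    | none => ""               -- Python raises ValueError (excluded by Pre_)
    | some v =>
      let start : Int := v * 2
      let pos := pvScanB cs (start + 2)
      let e : Int :=
        if pos < (cs.length : Int) ∧ PySem.List.pyGet? cs pos = some 'c' then pos + 4 else pos
      let result := PySem.List.slice cs (some start) (some e)
      match PySem.List.pyGet? result (-4) with
      | none => ""             -- Python raises IndexError (excluded by Pre_)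
      | some ch =>
        if ch = 'c' then
          rec (acc ++ PySem.List.slice cs (some start) (some (e - 4)))
            (String.ofList (PySem.List.slice cs (some (e - 4)) (some e)))
        else String.ofList (acc ++ result)

-- fuel bounds the loop iterations only; inside Pre_ the chained pointer offsets strictly
-- decrease from at most 0xfff, so at most 4097 iterations happen and fuel 0 is never reached
def pvChaseB (cs : List Char) : Nat → List Char → String → String
  | 0, _, _ => ""
  | fuel + 1, acc, tok => pvChaseStep (pvChaseB cs fuel) cs acc tok

def decompress_four_bytes_alt (four_bytes : String) (message : String) : String :=
  pvChaseB message.toList 4097 [] four_bytes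

-- ===== PRECONDITION & SPEC =====
-- there is a "00" marker at position p (A's first break test)
def pvIsZB (cs : List Char) (p : Int) : Bool :=
  decide (PySem.List.slice cs (some p) (some (p + 2)) = ['0', '0'])
-- the character at position p is 'c' (A's second break test)
def pvIsCB (cs : List Char) (p : Int) : Bool :=
  decide (PySem.List.pyGet? cs p = some 'c')
-- the pointer offset encoded by a 4-char token (int(token[-3:], 16); -1 when Python raises ValueError)
def pvPtr (t : String) : Int :=
  (PySem.Int.ofStrBase? (PySem.Str.slice t (some (-3)) none) 16).getD (-1)
-- the pointer offset of the token at message position q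
def pvPtrAtI (cs : List Char) (q : Int) : Int :=
  pvPtr (String.ofList (PySem.List.slice cs (some q) (some (q + 4))))
-- the scan from s meets no break strictly before step j
def pvNoStopB (cs : List Char) (s : Int) (j : Nat) : Bool :=
  (List.range j).all fun i =>
    decide (i = 0) || (!pvIsZB cs (s + 2 * i) && !pvIsCB cs (s + 2 * i))
-- the scan from s first stops at step j
def pvStopB (cs : List Char) (s : Int) (j : Nat) : Bool :=
  decide (1 ≤ j) && pvNoStopB cs s j && (pvIsZB cs (s + 2 * j) || pvIsCB cs (s + 2 * j))
-- the stopped segment is long enough for result[-4] (no IndexError)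
def pvSegOKB (cs : List Char) (s : Int) (j : Nat) : Bool :=
  (!pvIsZB cs (s + 2 * j) || decide (2 ≤ j)) &&
  (!pvIsCB cs (s + 2 * j) || !decide ((cs.length : Int) < s + 2 * j + 4) ||
    decide (s + 4 ≤ (cs.length : Int)))
-- the segment at offset 2*v scans to a proper stop and supports result[-4]
def pvGoodB (cs : List Char) (v : Nat) : Bool :=
  decide (v ≤ 4095) && (List.range (cs.length + 1)).any fun j =>
    pvStopB cs (2 * (v : Int)) j && pvSegOKB cs (2 * (v : Int)) j
-- if the segment at 2*v chains to a further pointer token, that token's offset is < v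
def pvDecB (cs : List Char) (v : Nat) : Bool :=
  (List.range (cs.length + 1)).all fun j =>
    !pvStopB cs (2 * (v : Int)) j ||
      ((!pvIsZB cs (2 * (v : Int) + 2 * j) || !pvIsCB cs (2 * (v : Int) + 2 * j - 4) ||
          decide (0 ≤ pvPtrAtI cs (2 * (v : Int) + 2 * j - 4) ∧
            pvPtrAtI cs (2 * (v : Int) + 2 * j - 4) < (v : Int))) &&
        (!pvIsCB cs (2 * (v : Int) + 2 * j) ||
            !decide (2 * (v : Int) + 2 * j + 4 ≤ (cs.length : Int)) ||
          decide (0 ≤ pvPtrAtI cs (2 * (v : Int) + 2 * j) ∧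
            pvPtrAtI cs (2 * (v : Int) + 2 * j) < (v : Int))))
-- every full 4-char pointer token in the message parses to an offset whose segment is
-- well-terminated and whose own chained pointer (if any) strictly decreases
def pvWFB (cs : List Char) : Bool :=
  (List.range cs.length).all fun q =>
    !pvIsCB cs (q : Int) || !decide (q + 4 ≤ cs.length) ||
      (decide (0 ≤ pvPtrAtI cs (q : Int)) && pvGoodB cs (pvPtrAtI cs (q : Int)).toNat &&
        pvDecB cs (pvPtrAtI cs (q : Int)).toNat)

-- Pre_ admits every input with len(four_bytes) != 4 (A returns it unchanged) and every message
-- whose compression pointers are well-formed: the initial offset is non-negative, every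
-- addressed segment scans to a proper terminator and is long enough for result[-4], and
-- pointer offsets strictly decrease along chain links (the well-formed DNS shape), so A's
-- recursion terminates.  It excludes all inputs on which A raises (bad hex, negative or
-- unterminated or too-short segments, pointer cycles -> RecursionError) and — because which
-- pointers A actually follows is not a closed-form property of the input — also some messages
-- whose malformed, negative or non-decreasing pointer tokens are never followed, on which A
-- returns and B agrees (see the cites in the claim).
def Pre_decompress_four_bytes (four_bytes : String) (message : String) : Prop :=
  PySem.Str.len four_bytes ≠ 4 ∨
    (0 ≤ pvPtr four_bytes ∧ pvGoodB message.toList (pvPtr four_bytes).toNat = true ∧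
      pvDecB message.toList (pvPtr four_bytes).toNat = true ∧ pvWFB message.toList = true)

instance (four_bytes : String) (message : String) : Decidable (Pre_decompress_four_bytes four_bytes message) := by
  unfold Pre_decompress_four_bytes; infer_instance

def pvWitness_decompress_four_bytes : String × String := ("c005", "aabbab00ddeec001")

def Spec_decompress_four_bytes (four_bytes : String) (message : String) (out : String) : Prop := out = decompress_four_bytes_alt four_bytes message
instance (four_bytes : String) (message : String) (out : String) : Decidable (Spec_decompress_four_bytes four_bytes message out) := by unfold Spec_decompress_four_bytes; infer_instance

-- ===== CLAIM (what is proved, stated in full; the proofs are below) =====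
def Claim_equal_decompress_four_bytes : Prop := ∀ (four_bytes : String) (message : String), Dom_decompress_four_bytes four_bytes message → Pre_decompress_four_bytes four_bytes message → Spec_decompress_four_bytes four_bytes message (decompress_four_bytes four_bytes message)

-- ===== LEMMAS AND PROOFS =====

theorem pv_witness_ok :
    Dom_decompress_four_bytes pvWitness_decompress_four_bytes.1 pvWitness_decompress_four_bytes.2 ∧
    Pre_decompress_four_bytes pvWitness_decompress_four_bytes.1 pvWitness_decompress_four_bytes.2 := by
  constructor
  · decide
  · unfold Pre_decompress_four_bytes
    right
    refine ⟨by decide, by decide, by decide, by decide⟩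


-- Prop forms of the Bool precondition components, and their bridges

def pvIsZ (cs : List Char) (p : Int) : Prop :=
  PySem.List.slice cs (some p) (some (p + 2)) = ['0', '0']

def pvIsC (cs : List Char) (p : Int) : Prop :=
  PySem.List.pyGet? cs p = some 'c'

def pvNoStop (cs : List Char) (s : Int) (j : Nat) : Prop :=
  ∀ i : Nat, i < j → 1 ≤ i →
    PySem.List.slice cs (some (s + 2 * i)) (some (s + 2 * i + 2)) ≠ ['0', '0'] ∧
    PySem.List.pyGet? cs (s + 2 * i) ≠ some 'c'

def pvStop (cs : List Char) (s : Int) (j : Nat) : Prop :=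
  1 ≤ j ∧ pvNoStop cs s j ∧ (pvIsZ cs (s + 2 * j) ∨ pvIsC cs (s + 2 * j))

def pvSegOK (cs : List Char) (s : Int) (j : Nat) : Prop :=
  (pvIsZ cs (s + 2 * j) → 2 ≤ j) ∧
  (pvIsC cs (s + 2 * j) → (cs.length : Int) < s + 2 * j + 4 → s + 4 ≤ (cs.length : Int))

def pvGood (cs : List Char) (v : Nat) : Prop :=
  v ≤ 4095 ∧ ∃ j ≤ cs.length, pvStop cs (2 * (v : Int)) j ∧ pvSegOK cs (2 * (v : Int)) j

def pvDec (cs : List Char) (v : Nat) : Prop :=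
  ∀ j ≤ cs.length, pvStop cs (2 * (v : Int)) j →
    (pvIsZ cs (2 * (v : Int) + 2 * j) → pvIsC cs (2 * (v : Int) + 2 * j - 4) →
      0 ≤ pvPtrAtI cs (2 * (v : Int) + 2 * j - 4) ∧ pvPtrAtI cs (2 * (v : Int) + 2 * j - 4) < (v : Int)) ∧
    (pvIsC cs (2 * (v : Int) + 2 * j) → 2 * (v : Int) + 2 * j + 4 ≤ (cs.length : Int) →
      0 ≤ pvPtrAtI cs (2 * (v : Int) + 2 * j) ∧ pvPtrAtI cs (2 * (v : Int) + 2 * j) < (v : Int))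

def pvWF (cs : List Char) : Prop :=
  ∀ q : Nat, q < cs.length → pvIsC cs (q : Int) → q + 4 ≤ cs.length →
    0 ≤ pvPtrAtI cs (q : Int) ∧ pvGood cs (pvPtrAtI cs (q : Int)).toNat ∧
      pvDec cs (pvPtrAtI cs (q : Int)).toNat

theorem pvIsZB_iff (cs : List Char) (p : Int) : pvIsZB cs p = true ↔ pvIsZ cs p := by
  simp [pvIsZB, pvIsZ]

theorem pvIsCB_iff (cs : List Char) (p : Int) : pvIsCB cs p = true ↔ pvIsC cs p := by
  simp [pvIsCB, pvIsC]

theorem pvNoStopB_to (cs : List Char) (s : Int) (j : Nat)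
    (h : pvNoStopB cs s j = true) : pvNoStop cs s j := by
  intro i hij hi1
  simp only [pvNoStopB, List.all_eq_true, List.mem_range] at h
  have := h i hij
  simp only [Bool.or_eq_true, Bool.and_eq_true, Bool.not_eq_true', decide_eq_true_eq] at this
  rcases this with h0 | ⟨hz, hc⟩
  · omega
  · constructor
    · simpa [pvIsZB] using hz
    · simpa [pvIsCB] using hc

theorem pvStopB_iff (cs : List Char) (s : Int) (j : Nat) :
    pvStopB cs s j = true ↔ pvStop cs s j := by
  simp only [pvStopB, pvStop, Bool.and_eq_true, Bool.or_eq_true, decide_eq_true_eq]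
  constructor
  · rintro ⟨⟨h1, hns⟩, hzc⟩
    refine ⟨h1, pvNoStopB_to cs s j hns, ?_⟩
    rcases hzc with hz | hc
    · exact Or.inl ((pvIsZB_iff cs _).mp hz)
    · exact Or.inr ((pvIsCB_iff cs _).mp hc)
  · rintro ⟨h1, hns, hzc⟩
    refine ⟨⟨h1, ?_⟩, ?_⟩
    · simp only [pvNoStopB, List.all_eq_true, List.mem_range]
      intro i hij
      by_cases hi : i = 0
      · simp [hi]
      · have := hns i hij (by omega)
        simp only [Bool.or_eq_true, Bool.and_eq_true, Bool.not_eq_true', decide_eq_true_eq]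
        right
        exact ⟨by simpa [pvIsZB] using this.1, by simpa [pvIsCB] using this.2⟩
    · rcases hzc with hz | hc
      · exact Or.inl ((pvIsZB_iff cs _).mpr hz)
      · exact Or.inr ((pvIsCB_iff cs _).mpr hc)

theorem pvStopB_to (cs : List Char) (s : Int) (j : Nat)
    (h : pvStopB cs s j = true) : pvStop cs s j := by
  simp only [pvStopB, Bool.and_eq_true, Bool.or_eq_true, decide_eq_true_eq] at h
  exact ⟨h.1.1, pvNoStopB_to cs s j h.1.2,
    by rcases h.2 with hz | hc
       · exact Or.inl ((pvIsZB_iff cs _).mp hz)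
       · exact Or.inr ((pvIsCB_iff cs _).mp hc)⟩

theorem pvSegOKB_to (cs : List Char) (s : Int) (j : Nat)
    (h : pvSegOKB cs s j = true) : pvSegOK cs s j := by
  unfold pvSegOKB at h
  constructor
  · intro hz
    rw [(pvIsZB_iff cs _).mpr hz] at h
    simp only [Bool.not_true, Bool.false_or, Bool.and_eq_true, decide_eq_true_eq] at h
    exact h.1
  · intro hc hlt
    rw [(pvIsCB_iff cs _).mpr hc] at h
    simp only [Bool.not_true, Bool.false_or, Bool.and_eq_true, Bool.or_eq_true,
      Bool.not_eq_true', decide_eq_true_eq, decide_eq_false_iff_not] at h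
    rcases h.2 with hx | hx
    · omega
    · exact hx

theorem pvGoodB_to (cs : List Char) (v : Nat)
    (h : pvGoodB cs v = true) : pvGood cs v := by
  unfold pvGoodB at h
  simp only [Bool.and_eq_true, decide_eq_true_eq, List.any_eq_true,
    List.mem_range, Nat.lt_succ_iff] at h
  obtain ⟨h1, j, hj, hstop⟩ := h
  exact ⟨h1, j, hj, pvStopB_to cs _ j hstop.1, pvSegOKB_to cs _ j hstop.2⟩

theorem pvDecB_to (cs : List Char) (v : Nat)
    (h : pvDecB cs v = true) : pvDec cs v := by
  intro j hj hstop
  unfold pvDecB at h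
  simp only [List.all_eq_true, List.mem_range, Nat.lt_succ_iff] at h
  have hh := h j hj
  rw [(pvStopB_iff cs _ j).mpr hstop] at hh
  simp only [Bool.not_true, Bool.false_or, Bool.and_eq_true] at hh
  constructor
  · intro hz hc
    have h1 := hh.1
    rw [(pvIsZB_iff cs _).mpr hz, (pvIsCB_iff cs _).mpr hc] at h1
    simp only [Bool.not_true, Bool.false_or, decide_eq_true_eq] at h1
    exact h1
  · intro hc hle
    have h2 := hh.2
    rw [(pvIsCB_iff cs _).mpr hc] at h2
    simp only [Bool.not_true, Bool.false_or, Bool.or_eq_true, Bool.not_eq_true',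
      decide_eq_true_eq, decide_eq_false_iff_not] at h2
    rcases h2 with hx | hx
    · omega
    · exact hx

theorem pvWFB_to (cs : List Char)
    (h : pvWFB cs = true) : pvWF cs := by
  intro q hq hc h4
  unfold pvWFB at h
  simp only [List.all_eq_true, List.mem_range] at h
  have hh := h q hq
  rw [(pvIsCB_iff cs _).mpr hc] at hh
  simp only [Bool.not_true, Bool.false_or, Bool.or_eq_true, Bool.and_eq_true,
    Bool.not_eq_true', decide_eq_true_eq, decide_eq_false_iff_not] at hh
  rcases hh with hx | hx
  · omega
  · exact ⟨hx.1.1, pvGoodB_to cs _ hx.1.2, pvDecB_to cs _ hx.2⟩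

-- ===== scan lemmas (shared groundwork) =====

-- A's scan walks past positions with no break
theorem pvScanA_skip (cs : List Char) (s K : Int) (j : Nat)
    (hs : 0 ≤ s) (hbound : s + 2 * j ≤ (cs.length : Int))
    (hnb : pvNoStop cs s j) :
    ∀ d : Nat, ∀ a : Int, ((j : Int) - a).toNat = d → 1 ≤ a → a ≤ j → (j : Int) < K →
      pvScanA cs s (PySem.List.pyRange a K 1) = pvScanA cs s (PySem.List.pyRange j K 1) := by
  intro d
  induction d with
  | zero =>
    intro a hda ha haj hK
    have : a = (j : Int) := by omega
    subst this; rfl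
  | succ d ih =>
    intro a hda ha haj hK
    have haj' : a < (j : Int) := by omega
    set i : Nat := a.toNat with hidef
    have hai : a = (i : Int) := by omega
    rw [PySem.List.pyRange_one_cons (by omega : a < K)]
    have hno := hnb i (by omega) (by omega)
    have hrange : (s + 2 * a).toNat < cs.length := by omega
    have hget : PySem.List.pyGet? cs (s + a * 2) = some cs[(s + 2 * a).toNat] := by
      rw [PySem.List.pyGet?_of_nonneg cs (by omega)]
      have e : (s + a * 2).toNat = (s + 2 * a).toNat := by omega
      rw [e]
      exact List.getElem?_eq_getElem hrange
    have hslice : PySem.List.slice cs (some (s + a * 2)) (some (s + a * 2 + 2)) ≠ ['0','0'] := by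
      have e : s + a * 2 = s + 2 * i := by omega
      rw [e]; exact hno.1
    have hchar : cs[(s + 2 * a).toNat] ≠ 'c' := by
      intro h
      apply hno.2
      have e : s + 2 * (i : Int) = s + a * 2 := by omega
      rw [e, hget, h]
    simp only [pvScanA, hget]
    rw [if_neg hslice, if_neg hchar]
    exact ih (a + 1) (by omega) (by omega) (by omega) hK

-- B's scan walks past positions with no break
theorem pvScanB_skip (cs : List Char) (s : Int) (j : Nat)
    (hs : 0 ≤ s) (hbound : s + 2 * j ≤ (cs.length : Int))
    (hnb : pvNoStop cs s j) :
    ∀ d : Nat, ∀ a : Int, ((j : Int) - a).toNat = d → 1 ≤ a → a ≤ j →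
      pvScanB cs (s + 2 * a) = pvScanB cs (s + 2 * j) := by
  intro d
  induction d with
  | zero =>
    intro a hda ha haj
    have : a = (j : Int) := by omega
    subst this; rfl
  | succ d ih =>
    intro a hda ha haj
    have haj' : a < (j : Int) := by omega
    set i : Nat := a.toNat with hidef
    have hai : a = (i : Int) := by omega
    have hno := hnb i (by omega) (by omega)
    have hrange : (s + 2 * a).toNat < cs.length := by omega
    have hget : PySem.List.pyGet? cs (s + 2 * a) = some cs[(s + 2 * a).toNat] := by
      rw [PySem.List.pyGet?_of_nonneg cs (by omega)]
      exact List.getElem?_eq_getElem hrange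
    rw [pvScanB]
    rw [dif_pos ?_]
    · have e : s + 2 * a + 2 = s + 2 * (a + 1) := by ring
      rw [e]
      exact ih (a + 1) (by omega) (by omega) (by omega)
    · refine ⟨by omega, ?_, ?_⟩
      · have e : s + 2 * a = s + 2 * (i : Int) := by omega
        rw [e]; exact hno.1
      · rw [hget]
        intro h
        apply hno.2
        have e : s + 2 * (i : Int) = s + 2 * a := by omega
        rw [e, hget]
        exact h

-- B's scan stops where the loop condition fails
theorem pvScanB_stop (cs : List Char) (pos : Int)
    (h : ¬ (pos < (cs.length : Int) ∧
        PySem.List.slice cs (some pos) (some (pos + 2)) ≠ ['0', '0'] ∧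
        PySem.List.pyGet? cs pos ≠ some 'c')) :
    pvScanB cs pos = pos := by
  rw [pvScanB, dif_neg h]

-- A's scan breaks on "00" at position j
theorem pvScanA_break_zero (cs : List Char) (s K : Int) (j : Nat)
    (hjK : (j : Int) < K)
    (hsl : PySem.List.slice cs (some (s + 2 * j)) (some (s + 2 * j + 2)) = ['0', '0']) :
    pvScanA cs s (PySem.List.pyRange j K 1) = s + 2 * j := by
  rw [PySem.List.pyRange_one_cons hjK]
  have e : s + (j : Int) * 2 = s + 2 * j := by ring
  simp only [pvScanA, e, hsl, if_pos]

-- A's scan breaks on 'c' at position j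
theorem pvScanA_break_c (cs : List Char) (s K : Int) (j : Nat)
    (hjK : (j : Int) < K) (hs : 0 ≤ s) (hrange : s + 2 * j < (cs.length : Int))
    (hsl : PySem.List.slice cs (some (s + 2 * j)) (some (s + 2 * j + 2)) ≠ ['0', '0'])
    (hc : PySem.List.pyGet? cs (s + 2 * j) = some 'c') :
    pvScanA cs s (PySem.List.pyRange j K 1) = s + 2 * j + 4 := by
  rw [PySem.List.pyRange_one_cons hjK]
  have e : s + (j : Int) * 2 = s + 2 * j := by ring
  simp only [pvScanA, e, hsl, hc]
  simp

-- the element under a "00" slice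
theorem pv_zero_at (cs : List Char) (k : Nat) (hk : k ≤ cs.length)
    (hsl : PySem.List.slice cs (some (k : Int)) (some ((k : Int) + 2)) = ['0', '0']) :
    PySem.List.pyGet? cs (k : Int) = some '0' := by
  rw [PySem.List.slice_toNat cs (by omega) (by omega)] at hsl
  have e : ((k : Int) + 2).toNat - (k : Int).toNat = 2 := by omega
  rw [e] at hsl
  have h0 : (List.take 2 (List.drop (k:Int).toNat cs))[0]? = some '0' := by rw [hsl]; rfl
  rw [List.getElem?_take_of_lt (by omega), List.getElem?_drop] at h0
  rw [PySem.List.pyGet?_natCast]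
  simpa using h0

-- a "00" slice needs two characters
theorem pvIsZ_bound (cs : List Char) (p : Int) (hp : 0 ≤ p) (h : pvIsZ cs p) :
    p + 2 ≤ (cs.length : Int) := by
  unfold pvIsZ at h
  have := congrArg List.length h
  rw [PySem.List.slice_toNat cs hp (by omega)] at this
  simp [List.length_take, List.length_drop] at this
  omega

-- a 'c' character needs its position in range
theorem pvIsC_bound (cs : List Char) (p : Int) (hp : 0 ≤ p) (h : pvIsC cs p) :
    p < (cs.length : Int) := by
  unfold pvIsC at h
  by_contra hge
  rw [PySem.List.pyGet?_of_nonneg cs hp, List.getElem?_eq_none (by omega)] at h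
  simp at h


-- ===== small helpers =====

theorem pvPtr_some (t : String) (h : 0 ≤ pvPtr t) :
    PySem.Int.ofStrBase? (PySem.Str.slice t (some (-3)) none) 16 = some (pvPtr t) := by
  unfold pvPtr at h ⊢
  cases hx : PySem.Int.ofStrBase? (PySem.Str.slice t (some (-3)) none) 16 with
  | none => simp [hx] at h
  | some a => simp

theorem pv_slice_len (cs : List Char) (a b : Int) (h0 : 0 ≤ a) (hab : a ≤ b)
    (hb : b ≤ (cs.length : Int)) :
    (PySem.List.slice cs (some a) (some b)).length = (b - a).toNat := by
  rw [PySem.List.slice_toNat cs h0 (by omega)]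
  simp [List.length_take, List.length_drop]
  omega

-- ===== step lemmas for port A =====

-- A's body when the scan stops on "00" at step j
theorem pvA_zero (rec : String → String) (fb msg : String)
    (hlen : ¬ PySem.Str.len fb ≠ 4) (v : Int) (t j : Nat) (ch : Char)
    (hp : PySem.Int.ofStrBase? (PySem.Str.slice fb (some (-3)) none) 16 = some v)
    (ht : v * 2 = (t : Int))
    (h2j : 2 ≤ j)
    (hbnd : (t : Int) + 2 * j + 2 ≤ (msg.toList.length : Int))
    (hnb : pvNoStop msg.toList (t : Int) j)
    (hsl : pvIsZ msg.toList ((t : Int) + 2 * j))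
    (hr4 : PySem.List.pyGet? msg.toList ((t : Int) + 2 * j - 4) = some ch) :
    pvDecompStep rec fb msg =
      if ch = 'c' then
        String.ofList (PySem.List.slice msg.toList (some (t : Int)) (some ((t : Int) + 2 * j - 4)))
          ++ rec (String.ofList (PySem.List.slice msg.toList (some ((t : Int) + 2 * j - 4))
              (some ((t : Int) + 2 * j))))
      else String.ofList (PySem.List.slice msg.toList (some (t : Int)) (some ((t : Int) + 2 * j))) := by
  unfold pvIsZ at hsl
  unfold pvDecompStep
  rw [if_neg hlen, hp]
  dsimp only
  rw [ht]
  set cs := msg.toList with hcsdef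
  have hKj : ((j : Int)) < PySem.Int.floordiv ((cs.length : Int) - (t : Int)) 2 + 1 := by
    have := (PySem.Int.le_floordiv_iff_mul_le
      (a := (cs.length : Int) - (t : Int)) (q := (j : Int)) (by norm_num : (0:Int) < 2)).mpr
      (by omega)
    omega
  have hscanA : pvScanA cs (t : Int)
      (PySem.List.pyRange 1 (PySem.Int.floordiv ((cs.length : Int) - (t : Int)) 2 + 1) 1)
      = (t : Int) + 2 * j := by
    rw [pvScanA_skip cs (t : Int) _ j (by omega) (by omega) hnb (j - 1) 1 (by omega)
      (by omega) (by omega) hKj]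
    exact pvScanA_break_zero cs (t : Int) _ j hKj (by
      have e : (t : Int) + 2 * j + 2 = ((t : Int) + 2 * j) + 2 := by ring
      rw [← e] at hsl ⊢
      exact hsl)
  rw [hscanA]
  have hres : PySem.List.slice cs (some (t : Int)) (some ((t : Int) + 2 * j))
      = List.take (2 * j) (List.drop t cs) := by
    rw [PySem.List.slice_toNat cs (by omega) (by omega)]
    have e1 : ((t : Int)).toNat = t := by omega
    have e2 : ((t : Int) + 2 * (j : Int)).toNat = t + 2 * j := by omega
    rw [e1, e2]
    have e3 : t + 2 * j - t = 2 * j := by omega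
    rw [e3]
  have hlenres : (List.take (2 * j) (List.drop t cs)).length = 2 * j := by
    simp [List.length_take, List.length_drop]; omega
  have hr4' : cs[t + 2 * j - 4]? = some ch := by
    rw [PySem.List.pyGet?_of_nonneg cs (by omega)] at hr4
    have e : ((t : Int) + 2 * ↑j - 4).toNat = t + 2 * j - 4 := by omega
    rw [e] at hr4
    exact hr4
  have hg : PySem.List.pyGet? (PySem.List.slice cs (some (t : Int)) (some ((t : Int) + 2 * j))) (-4)
      = some ch := by
    rw [hres, PySem.List.pyGet?_neg_ofNat (List.take (2 * j) (List.drop t cs)) 4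
      (by omega) (by rw [hlenres]; omega), hlenres,
      List.getElem?_take_of_lt (by omega), List.getElem?_drop]
    have e : t + (2 * j - 4) = t + 2 * j - 4 := by omega
    rw [e]
    exact hr4'
  rw [hg]

-- A's body when the scan stops on 'c' at step j with the 4-char pointer token fully in range
theorem pvA_cfull (rec : String → String) (fb msg : String)
    (hlen : ¬ PySem.Str.len fb ≠ 4) (v : Int) (t j : Nat)
    (hp : PySem.Int.ofStrBase? (PySem.Str.slice fb (some (-3)) none) 16 = some v)
    (ht : v * 2 = (t : Int))
    (h1j : 1 ≤ j)
    (hfull : (t : Int) + 2 * j + 4 ≤ (msg.toList.length : Int))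
    (hnb : pvNoStop msg.toList (t : Int) j)
    (hc : pvIsC msg.toList ((t : Int) + 2 * j)) :
    pvDecompStep rec fb msg =
      String.ofList (PySem.List.slice msg.toList (some (t : Int)) (some ((t : Int) + 2 * j)))
        ++ rec (String.ofList (PySem.List.slice msg.toList (some ((t : Int) + 2 * j))
            (some ((t : Int) + 2 * j + 4)))) := by
  unfold pvIsC at hc
  unfold pvDecompStep
  rw [if_neg hlen, hp]
  dsimp only
  rw [ht]
  set cs := msg.toList with hcsdef
  have hKj : ((j : Int)) < PySem.Int.floordiv ((cs.length : Int) - (t : Int)) 2 + 1 := by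
    have := (PySem.Int.le_floordiv_iff_mul_le
      (a := (cs.length : Int) - (t : Int)) (q := (j : Int)) (by norm_num : (0:Int) < 2)).mpr
      (by omega)
    omega
  have hcz : PySem.List.slice cs (some ((t : Int) + 2 * j)) (some ((t : Int) + 2 * j + 2))
      ≠ ['0', '0'] := by
    intro hz
    have h0 := pv_zero_at cs (t + 2 * j) (by omega) (by
      have e : ((t + 2 * j : Nat) : Int) = (t : Int) + 2 * j := by push_cast; ring
      rw [e]; exact hz)
    have e : ((t + 2 * j : Nat) : Int) = (t : Int) + 2 * j := by push_cast; ring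
    rw [e, hc] at h0
    cases h0
  have hscanA : pvScanA cs (t : Int)
      (PySem.List.pyRange 1 (PySem.Int.floordiv ((cs.length : Int) - (t : Int)) 2 + 1) 1)
      = (t : Int) + 2 * j + 4 := by
    rw [pvScanA_skip cs (t : Int) _ j (by omega) (by omega) hnb (j - 1) 1 (by omega)
      (by omega) (by omega) hKj]
    exact pvScanA_break_c cs (t : Int) _ j hKj (by omega) (by omega) hcz hc
  rw [hscanA]
  have hres : PySem.List.slice cs (some (t : Int)) (some ((t : Int) + 2 * j + 4))
      = List.take (2 * j + 4) (List.drop t cs) := by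
    rw [PySem.List.slice_toNat cs (by omega) (by omega)]
    have e1 : ((t : Int)).toNat = t := by omega
    have e2 : ((t : Int) + 2 * (j : Int) + 4).toNat = t + (2 * j + 4) := by omega
    rw [e1, e2]
    have e3 : t + (2 * j + 4) - t = 2 * j + 4 := by omega
    rw [e3]
  have hlenres : (List.take (2 * j + 4) (List.drop t cs)).length = 2 * j + 4 := by
    simp [List.length_take, List.length_drop]; omega
  have hr4' : cs[t + 2 * j]? = some 'c' := by
    rw [PySem.List.pyGet?_of_nonneg cs (by omega)] at hc
    have e : ((t : Int) + 2 * ↑j).toNat = t + 2 * j := by omega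
    rw [e] at hc
    exact hc
  have hg : PySem.List.pyGet?
      (PySem.List.slice cs (some (t : Int)) (some ((t : Int) + 2 * j + 4))) (-4)
      = some 'c' := by
    rw [hres, PySem.List.pyGet?_neg_ofNat (List.take (2 * j + 4) (List.drop t cs)) 4
      (by omega) (by rw [hlenres]; omega), hlenres,
      List.getElem?_take_of_lt (by omega), List.getElem?_drop]
    have e : t + (2 * j + 4 - 4) = t + 2 * j := by omega
    rw [e]
    exact hr4'
  rw [hg]
  dsimp only
  rw [if_pos rfl]
  have e4 : ((t : Int) + 2 * j + 4 - 4 : Int) = (t : Int) + 2 * j := by ring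
  rw [e4]

-- A's body when the scan stops on 'c' at step j but the pointer token is cut off by the
-- end of the message
theorem pvA_cclip (rec : String → String) (fb msg : String)
    (hlen : ¬ PySem.Str.len fb ≠ 4) (v : Int) (t j : Nat) (ch : Char)
    (hp : PySem.Int.ofStrBase? (PySem.Str.slice fb (some (-3)) none) 16 = some v)
    (ht : v * 2 = (t : Int))
    (h1j : 1 ≤ j)
    (hlt : (t : Int) + 2 * j < (msg.toList.length : Int))
    (hclip : (msg.toList.length : Int) < (t : Int) + 2 * j + 4)
    (h4 : (t : Int) + 4 ≤ (msg.toList.length : Int))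
    (hnb : pvNoStop msg.toList (t : Int) j)
    (hc : pvIsC msg.toList ((t : Int) + 2 * j))
    (hr4 : PySem.List.pyGet? msg.toList ((msg.toList.length : Int) - 4) = some ch) :
    pvDecompStep rec fb msg =
      if ch = 'c' then
        String.ofList (PySem.List.slice msg.toList (some (t : Int)) (some ((t : Int) + 2 * j)))
          ++ rec (String.ofList (PySem.List.slice msg.toList (some ((t : Int) + 2 * j))
              (some ((t : Int) + 2 * j + 4))))
      else String.ofList (List.drop t msg.toList) := by
  unfold pvIsC at hc
  unfold pvDecompStep
  rw [if_neg hlen, hp]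
  dsimp only
  rw [ht]
  set cs := msg.toList with hcsdef
  have hKj : ((j : Int)) < PySem.Int.floordiv ((cs.length : Int) - (t : Int)) 2 + 1 := by
    have := (PySem.Int.le_floordiv_iff_mul_le
      (a := (cs.length : Int) - (t : Int)) (q := (j : Int)) (by norm_num : (0:Int) < 2)).mpr
      (by omega)
    omega
  have hcz : PySem.List.slice cs (some ((t : Int) + 2 * j)) (some ((t : Int) + 2 * j + 2))
      ≠ ['0', '0'] := by
    intro hz
    have h0 := pv_zero_at cs (t + 2 * j) (by omega) (by
      have e : ((t + 2 * j : Nat) : Int) = (t : Int) + 2 * j := by push_cast; ring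
      rw [e]; exact hz)
    have e : ((t + 2 * j : Nat) : Int) = (t : Int) + 2 * j := by push_cast; ring
    rw [e, hc] at h0
    cases h0
  have hscanA : pvScanA cs (t : Int)
      (PySem.List.pyRange 1 (PySem.Int.floordiv ((cs.length : Int) - (t : Int)) 2 + 1) 1)
      = (t : Int) + 2 * j + 4 := by
    rw [pvScanA_skip cs (t : Int) _ j (by omega) (by omega) hnb (j - 1) 1 (by omega)
      (by omega) (by omega) hKj]
    exact pvScanA_break_c cs (t : Int) _ j hKj (by omega) (by omega) hcz hc
  rw [hscanA]
  have hres : PySem.List.slice cs (some (t : Int)) (some ((t : Int) + 2 * j + 4))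
      = List.drop t cs := by
    rw [PySem.List.slice_toNat cs (by omega) (by omega)]
    have e1 : ((t : Int)).toNat = t := by omega
    rw [e1]
    apply List.take_of_length_le
    simp [List.length_drop]; omega
  have hlenres : (List.drop t cs).length = cs.length - t := by
    simp [List.length_drop]
  have hr4' : cs[cs.length - 4]? = some ch := by
    rw [PySem.List.pyGet?_of_nonneg cs (by omega)] at hr4
    have e : ((cs.length : Int) - 4).toNat = cs.length - 4 := by omega
    rw [e] at hr4
    exact hr4
  have hg : PySem.List.pyGet?
      (PySem.List.slice cs (some (t : Int)) (some ((t : Int) + 2 * j + 4))) (-4)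
      = some ch := by
    rw [hres, PySem.List.pyGet?_neg_ofNat (List.drop t cs) 4
      (by omega) (by rw [hlenres]; omega), hlenres,
      List.getElem?_drop]
    have e : t + (cs.length - t - 4) = cs.length - 4 := by omega
    rw [e]
    exact hr4'
  rw [hg]
  dsimp only
  by_cases hch : ch = 'c'
  · rw [if_pos hch, if_pos hch]
    have e4 : ((t : Int) + 2 * j + 4 - 4 : Int) = (t : Int) + 2 * j := by ring
    rw [e4]
  · rw [if_neg hch, if_neg hch, hres]



-- ===== step lemmas for port B =====

-- B's loop body when the scan stops on "00" at step j
theorem pvB_zero (rec : List Char → String → String) (msg : String) (acc : List Char)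
    (tok : String)
    (hlen : ¬ PySem.Str.len tok ≠ 4) (v : Int) (t j : Nat) (ch : Char)
    (hp : PySem.Int.ofStrBase? (PySem.Str.slice tok (some (-3)) none) 16 = some v)
    (ht : v * 2 = (t : Int))
    (h2j : 2 ≤ j)
    (hbnd : (t : Int) + 2 * j + 2 ≤ (msg.toList.length : Int))
    (hnb : pvNoStop msg.toList (t : Int) j)
    (hsl : pvIsZ msg.toList ((t : Int) + 2 * j))
    (hr4 : PySem.List.pyGet? msg.toList ((t : Int) + 2 * j - 4) = some ch) :
    pvChaseStep rec msg.toList acc tok =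
      if ch = 'c' then
        rec (acc ++ PySem.List.slice msg.toList (some (t : Int)) (some ((t : Int) + 2 * j - 4)))
          (String.ofList (PySem.List.slice msg.toList (some ((t : Int) + 2 * j - 4))
            (some ((t : Int) + 2 * j))))
      else String.ofList
        (acc ++ PySem.List.slice msg.toList (some (t : Int)) (some ((t : Int) + 2 * j))) := by
  unfold pvIsZ at hsl
  unfold pvChaseStep
  rw [if_neg hlen, hp]
  dsimp only
  rw [ht]
  set cs := msg.toList with hcsdef
  have hz0 : PySem.List.pyGet? cs ((t : Int) + 2 * j) = some '0' := by
    have h0 := pv_zero_at cs (t + 2 * j) (by omega) (by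
      have e : ((t + 2 * j : Nat) : Int) = (t : Int) + 2 * j := by push_cast; ring
      rw [e]
      have e2 : (t : Int) + 2 * j + 2 = ((t : Int) + 2 * j) + 2 := by ring
      rw [← e2] at hsl
      exact hsl)
    have e : ((t + 2 * j : Nat) : Int) = (t : Int) + 2 * j := by push_cast; ring
    rw [e] at h0
    exact h0
  have hscanB : pvScanB cs ((t : Int) + 2) = (t : Int) + 2 * j := by
    have e1 : (t : Int) + 2 = (t : Int) + 2 * (1 : Int) := by ring
    rw [e1, pvScanB_skip cs (t : Int) j (by omega) (by omega) hnb (j - 1) 1 (by omega)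
      (by omega) (by omega)]
    exact pvScanB_stop cs _ (by
      rintro ⟨-, h2, -⟩
      have e2 : (t : Int) + 2 * j + 2 = ((t : Int) + 2 * j) + 2 := by ring
      rw [← e2] at h2
      exact h2 hsl)
  rw [hscanB]
  rw [if_neg (by rintro ⟨-, hcc⟩; rw [hz0] at hcc; cases hcc)]
  have hres : PySem.List.slice cs (some (t : Int)) (some ((t : Int) + 2 * j))
      = List.take (2 * j) (List.drop t cs) := by
    rw [PySem.List.slice_toNat cs (by omega) (by omega)]
    have e1 : ((t : Int)).toNat = t := by omega
    have e2 : ((t : Int) + 2 * (j : Int)).toNat = t + 2 * j := by omega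
    rw [e1, e2]
    have e3 : t + 2 * j - t = 2 * j := by omega
    rw [e3]
  have hlenres : (List.take (2 * j) (List.drop t cs)).length = 2 * j := by
    simp [List.length_take, List.length_drop]; omega
  have hr4' : cs[t + 2 * j - 4]? = some ch := by
    rw [PySem.List.pyGet?_of_nonneg cs (by omega)] at hr4
    have e : ((t : Int) + 2 * ↑j - 4).toNat = t + 2 * j - 4 := by omega
    rw [e] at hr4
    exact hr4
  have hg : PySem.List.pyGet? (PySem.List.slice cs (some (t : Int)) (some ((t : Int) + 2 * j))) (-4)
      = some ch := by
    rw [hres, PySem.List.pyGet?_neg_ofNat (List.take (2 * j) (List.drop t cs)) 4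
      (by omega) (by rw [hlenres]; omega), hlenres,
      List.getElem?_take_of_lt (by omega), List.getElem?_drop]
    have e : t + (2 * j - 4) = t + 2 * j - 4 := by omega
    rw [e]
    exact hr4'
  rw [hg]

-- B's loop body when the scan stops on 'c' at step j with the 4-char token fully in range
theorem pvB_cfull (rec : List Char → String → String) (msg : String) (acc : List Char)
    (tok : String)
    (hlen : ¬ PySem.Str.len tok ≠ 4) (v : Int) (t j : Nat)
    (hp : PySem.Int.ofStrBase? (PySem.Str.slice tok (some (-3)) none) 16 = some v)
    (ht : v * 2 = (t : Int))
    (h1j : 1 ≤ j)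
    (hfull : (t : Int) + 2 * j + 4 ≤ (msg.toList.length : Int))
    (hnb : pvNoStop msg.toList (t : Int) j)
    (hc : pvIsC msg.toList ((t : Int) + 2 * j)) :
    pvChaseStep rec msg.toList acc tok =
      rec (acc ++ PySem.List.slice msg.toList (some (t : Int)) (some ((t : Int) + 2 * j)))
        (String.ofList (PySem.List.slice msg.toList (some ((t : Int) + 2 * j))
          (some ((t : Int) + 2 * j + 4)))) := by
  unfold pvIsC at hc
  unfold pvChaseStep
  rw [if_neg hlen, hp]
  dsimp only
  rw [ht]
  set cs := msg.toList with hcsdef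
  have hscanB : pvScanB cs ((t : Int) + 2) = (t : Int) + 2 * j := by
    have e1 : (t : Int) + 2 = (t : Int) + 2 * (1 : Int) := by ring
    rw [e1, pvScanB_skip cs (t : Int) j (by omega) (by omega) hnb (j - 1) 1 (by omega)
      (by omega) (by omega)]
    exact pvScanB_stop cs _ (by rintro ⟨-, -, h3⟩; exact h3 hc)
  rw [hscanB]
  rw [if_pos ⟨by omega, hc⟩]
  have hres : PySem.List.slice cs (some (t : Int)) (some ((t : Int) + 2 * j + 4))
      = List.take (2 * j + 4) (List.drop t cs) := by
    rw [PySem.List.slice_toNat cs (by omega) (by omega)]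
    have e1 : ((t : Int)).toNat = t := by omega
    have e2 : ((t : Int) + 2 * (j : Int) + 4).toNat = t + (2 * j + 4) := by omega
    rw [e1, e2]
    have e3 : t + (2 * j + 4) - t = 2 * j + 4 := by omega
    rw [e3]
  have hlenres : (List.take (2 * j + 4) (List.drop t cs)).length = 2 * j + 4 := by
    simp [List.length_take, List.length_drop]; omega
  have hr4' : cs[t + 2 * j]? = some 'c' := by
    rw [PySem.List.pyGet?_of_nonneg cs (by omega)] at hc
    have e : ((t : Int) + 2 * ↑j).toNat = t + 2 * j := by omega
    rw [e] at hc
    exact hc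
  have hg : PySem.List.pyGet?
      (PySem.List.slice cs (some (t : Int)) (some ((t : Int) + 2 * j + 4))) (-4)
      = some 'c' := by
    rw [hres, PySem.List.pyGet?_neg_ofNat (List.take (2 * j + 4) (List.drop t cs)) 4
      (by omega) (by rw [hlenres]; omega), hlenres,
      List.getElem?_take_of_lt (by omega), List.getElem?_drop]
    have e : t + (2 * j + 4 - 4) = t + 2 * j := by omega
    rw [e]
    exact hr4'
  rw [hg]
  dsimp only
  rw [if_pos rfl]
  have e4 : ((t : Int) + 2 * j + 4 - 4 : Int) = (t : Int) + 2 * j := by ring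
  rw [e4]

-- B's loop body when the scan stops on 'c' at step j but the token is cut off
theorem pvB_cclip (rec : List Char → String → String) (msg : String) (acc : List Char)
    (tok : String)
    (hlen : ¬ PySem.Str.len tok ≠ 4) (v : Int) (t j : Nat) (ch : Char)
    (hp : PySem.Int.ofStrBase? (PySem.Str.slice tok (some (-3)) none) 16 = some v)
    (ht : v * 2 = (t : Int))
    (h1j : 1 ≤ j)
    (hlt : (t : Int) + 2 * j < (msg.toList.length : Int))
    (hclip : (msg.toList.length : Int) < (t : Int) + 2 * j + 4)
    (h4 : (t : Int) + 4 ≤ (msg.toList.length : Int))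
    (hnb : pvNoStop msg.toList (t : Int) j)
    (hc : pvIsC msg.toList ((t : Int) + 2 * j))
    (hr4 : PySem.List.pyGet? msg.toList ((msg.toList.length : Int) - 4) = some ch) :
    pvChaseStep rec msg.toList acc tok =
      if ch = 'c' then
        rec (acc ++ PySem.List.slice msg.toList (some (t : Int)) (some ((t : Int) + 2 * j)))
          (String.ofList (PySem.List.slice msg.toList (some ((t : Int) + 2 * j))
            (some ((t : Int) + 2 * j + 4))))
      else String.ofList (acc ++ List.drop t msg.toList) := by
  unfold pvIsC at hc
  unfold pvChaseStep
  rw [if_neg hlen, hp]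
  dsimp only
  rw [ht]
  set cs := msg.toList with hcsdef
  have hscanB : pvScanB cs ((t : Int) + 2) = (t : Int) + 2 * j := by
    have e1 : (t : Int) + 2 = (t : Int) + 2 * (1 : Int) := by ring
    rw [e1, pvScanB_skip cs (t : Int) j (by omega) (by omega) hnb (j - 1) 1 (by omega)
      (by omega) (by omega)]
    exact pvScanB_stop cs _ (by rintro ⟨-, -, h3⟩; exact h3 hc)
  rw [hscanB]
  rw [if_pos ⟨by omega, hc⟩]
  have hres : PySem.List.slice cs (some (t : Int)) (some ((t : Int) + 2 * j + 4))
      = List.drop t cs := by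
    rw [PySem.List.slice_toNat cs (by omega) (by omega)]
    have e1 : ((t : Int)).toNat = t := by omega
    rw [e1]
    apply List.take_of_length_le
    simp [List.length_drop]; omega
  have hlenres : (List.drop t cs).length = cs.length - t := by
    simp [List.length_drop]
  have hr4' : cs[cs.length - 4]? = some ch := by
    rw [PySem.List.pyGet?_of_nonneg cs (by omega)] at hr4
    have e : ((cs.length : Int) - 4).toNat = cs.length - 4 := by omega
    rw [e] at hr4
    exact hr4
  have hg : PySem.List.pyGet?
      (PySem.List.slice cs (some (t : Int)) (some ((t : Int) + 2 * j + 4))) (-4)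
      = some ch := by
    rw [hres, PySem.List.pyGet?_neg_ofNat (List.drop t cs) 4
      (by omega) (by rw [hlenres]; omega), hlenres,
      List.getElem?_drop]
    have e : t + (cs.length - t - 4) = cs.length - 4 := by omega
    rw [e]
    exact hr4'
  rw [hg]
  dsimp only
  by_cases hch : ch = 'c'
  · rw [if_pos hch, if_pos hch]
    have e4 : ((t : Int) + 2 * j + 4 - 4 : Int) = (t : Int) + 2 * j := by ring
    rw [e4]
  · rw [if_neg hch, if_neg hch, hres]



-- ===== the main induction: B's chase loop equals A's recursion with an accumulator =====

theorem pv_len_tok (cs : List Char) (a b : Int) (h0 : 0 ≤ a) (hab : a + 4 = b)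
    (hb : b ≤ (cs.length : Int)) :
    ¬ PySem.Str.len (String.ofList (PySem.List.slice cs (some a) (some b))) ≠ 4 := by
  have hl := pv_slice_len cs a b h0 (by omega) hb
  have he : PySem.Str.len (String.ofList (PySem.List.slice cs (some a) (some b)))
      = ((PySem.List.slice cs (some a) (some b)).length : Int) := by
    simp [PySem.Str.len_eq]
  rw [he, hl]
  omega

theorem pvMain (msg : String) (hWF : pvWF msg.toList) :
    ∀ fuel : Nat, ∀ (acc : List Char) (tok : String) (v : Nat),
      (¬ PySem.Str.len tok ≠ 4) →
      PySem.Int.ofStrBase? (PySem.Str.slice tok (some (-3)) none) 16 = some ((v : Nat) : Int) →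
      pvGood msg.toList v → pvDec msg.toList v → v + 2 ≤ fuel →
      pvChaseB msg.toList fuel acc tok
        = String.ofList (acc ++ (pvDecompA fuel tok msg).toList) := by
  intro fuel
  induction fuel with
  | zero =>
    intro acc tok v _ _ _ _ hfuel
    exact absurd hfuel (by omega)
  | succ fuel ih =>
    intro acc tok v hlen hp hgood hdec hfuel
    obtain ⟨hv4095, j, hjn, hstop, hsegok⟩ := hgood
    have hts : (((2 * v : Nat) : Nat) : Int) = 2 * (v : Int) := by push_cast; ring
    rw [← hts] at hstop hsegok
    set t : Nat := 2 * v with htdef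
    obtain ⟨h1j, hnb, hzc⟩ := hstop
    have ht : ((v : Nat) : Int) * 2 = ((t : Nat) : Int) := by omega
    rw [show pvChaseB msg.toList (fuel + 1) acc tok
        = pvChaseStep (pvChaseB msg.toList fuel) msg.toList acc tok from rfl]
    rw [show pvDecompA (fuel + 1) tok msg
        = pvDecompStep (fun tk => pvDecompA fuel tk msg) tok msg from rfl]
    rcases hzc with hz | hc
    · -- the scan stops on "00"
      have h2j : 2 ≤ j := hsegok.1 hz
      have hbnd : (t : Int) + 2 * j + 2 ≤ (msg.toList.length : Int) := by
        have := pvIsZ_bound msg.toList ((t : Int) + 2 * j) (by omega) hz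
        omega
      obtain ⟨ch, hr4⟩ : ∃ ch, PySem.List.pyGet? msg.toList ((t : Int) + 2 * j - 4) = some ch := by
        rw [PySem.List.pyGet?_of_nonneg msg.toList (by omega)]
        have hidx : (((t : Int) + 2 * j - 4)).toNat < msg.toList.length := by omega
        exact ⟨_, List.getElem?_eq_getElem hidx⟩
      rw [pvB_zero (pvChaseB msg.toList fuel) msg acc tok hlen _ t j ch hp ht h2j hbnd hnb hz hr4]
      rw [pvA_zero (fun tk => pvDecompA fuel tk msg) tok msg hlen _ t j ch hp ht h2j hbnd hnb hz hr4]
      by_cases hch : ch = 'c'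
      · rw [if_pos hch, if_pos hch]
        -- chained pointer token at t + 2*j - 4
        have hcq : pvIsC msg.toList ((t : Int) + 2 * j - 4) := by
          unfold pvIsC; rw [hr4, hch]
        have hdd0 := hdec j hjn (by rw [← hts]; exact ⟨h1j, hnb, Or.inl hz⟩)
        rw [← hts] at hdd0
        have hdd := hdd0.1 hz hcq
        have hq0 : (0 : Int) ≤ (t : Int) + 2 * j - 4 := by omega
        have hqn : (((t : Int) + 2 * j - 4).toNat : Int) = (t : Int) + 2 * j - 4 :=
          Int.toNat_of_nonneg hq0
        have hwf := hWF ((t : Int) + 2 * j - 4).toNat (by omega)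
          (by rw [hqn]; exact hcq) (by omega)
        rw [hqn] at hwf
        obtain ⟨hP0, hGood', hDec'⟩ := hwf
        have hq4 : ((t : Int) + 2 * j - 4) + 4 = (t : Int) + 2 * j := by ring
        have hPtrTok : pvPtr (String.ofList (PySem.List.slice msg.toList
              (some ((t : Int) + 2 * j - 4)) (some ((t : Int) + 2 * j))))
            = pvPtrAtI msg.toList ((t : Int) + 2 * j - 4) := by
          unfold pvPtrAtI; rw [hq4]
        have hwm : (((pvPtrAtI msg.toList ((t : Int) + 2 * j - 4)).toNat : Nat) : Int)
            = pvPtrAtI msg.toList ((t : Int) + 2 * j - 4) := Int.toNat_of_nonneg hdd.1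
        have hlen' := pv_len_tok msg.toList ((t : Int) + 2 * j - 4) ((t : Int) + 2 * j)
          hq0 hq4 (by omega)
        have hp' : PySem.Int.ofStrBase? (PySem.Str.slice (String.ofList (PySem.List.slice
              msg.toList (some ((t : Int) + 2 * j - 4)) (some ((t : Int) + 2 * j))))
              (some (-3)) none) 16
            = some (((pvPtrAtI msg.toList ((t : Int) + 2 * j - 4)).toNat : Int)) := by
          rw [pvPtr_some _ (by rw [hPtrTok]; exact hdd.1), hPtrTok, hwm]
        rw [ih _ _ _ hlen' hp' hGood' hDec' (by omega)]
        simp [List.append_assoc]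
      · rw [if_neg hch, if_neg hch]
        simp
    · -- the scan stops on 'c'
      have hlt : (t : Int) + 2 * j < (msg.toList.length : Int) :=
        pvIsC_bound msg.toList ((t : Int) + 2 * j) (by omega) hc
      by_cases hfull : (t : Int) + 2 * j + 4 ≤ (msg.toList.length : Int)
      · -- full 4-char pointer token: always a chain
        rw [pvB_cfull (pvChaseB msg.toList fuel) msg acc tok hlen _ t j hp ht h1j hfull hnb hc]
        rw [pvA_cfull (fun tk => pvDecompA fuel tk msg) tok msg hlen _ t j hp ht h1j hfull hnb hc]
        have hdd0 := hdec j hjn (by rw [← hts]; exact ⟨h1j, hnb, Or.inr hc⟩)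
        rw [← hts] at hdd0
        have hdd := hdd0.2 hc hfull
        have hq0 : (0 : Int) ≤ (t : Int) + 2 * j := by omega
        have hqn : (((t : Int) + 2 * j).toNat : Int) = (t : Int) + 2 * j :=
          Int.toNat_of_nonneg hq0
        have hwf := hWF ((t : Int) + 2 * j).toNat (by omega) (by rw [hqn]; exact hc) (by omega)
        rw [hqn] at hwf
        obtain ⟨hP0, hGood', hDec'⟩ := hwf
        have hwm : (((pvPtrAtI msg.toList ((t : Int) + 2 * j)).toNat : Nat) : Int)
            = pvPtrAtI msg.toList ((t : Int) + 2 * j) := Int.toNat_of_nonneg hdd.1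
        have hlen' := pv_len_tok msg.toList ((t : Int) + 2 * j) ((t : Int) + 2 * j + 4)
          hq0 rfl (by omega)
        have hp' : PySem.Int.ofStrBase? (PySem.Str.slice (String.ofList (PySem.List.slice
              msg.toList (some ((t : Int) + 2 * j)) (some ((t : Int) + 2 * j + 4))))
              (some (-3)) none) 16
            = some (((pvPtrAtI msg.toList ((t : Int) + 2 * j)).toNat : Int)) := by
          rw [pvPtr_some _ hdd.1, hwm]
          rfl
        rw [ih _ _ _ hlen' hp' hGood' hDec' (by omega)]
        simp [List.append_assoc]
      · -- pointer token cut off by the end of the message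
        have hclip : (msg.toList.length : Int) < (t : Int) + 2 * j + 4 := by omega
        have h4 : (t : Int) + 4 ≤ (msg.toList.length : Int) := hsegok.2 hc hclip
        obtain ⟨ch, hr4⟩ : ∃ ch, PySem.List.pyGet? msg.toList
            ((msg.toList.length : Int) - 4) = some ch := by
          rw [PySem.List.pyGet?_of_nonneg msg.toList (by omega)]
          have hidx : ((msg.toList.length : Int) - 4).toNat < msg.toList.length := by omega
          exact ⟨_, List.getElem?_eq_getElem hidx⟩
        rw [pvB_cclip (pvChaseB msg.toList fuel) msg acc tok hlen _ t j ch hp ht h1j hlt hclip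
          h4 hnb hc hr4]
        rw [pvA_cclip (fun tk => pvDecompA fuel tk msg) tok msg hlen _ t j ch hp ht h1j hlt
          hclip h4 hnb hc hr4]
        by_cases hch : ch = 'c'
        · rw [if_pos hch, if_pos hch]
          -- the chained token is shorter than 4: one more step ends both programs
          obtain ⟨f, rfl⟩ : ∃ f, fuel = f + 1 := ⟨fuel - 1, by omega⟩
          have hlentok : (PySem.List.slice msg.toList (some ((t : Int) + 2 * j))
              (some ((t : Int) + 2 * j + 4))).length = msg.toList.length - (t + 2 * j) := by
            rw [PySem.List.slice_toNat msg.toList (by omega) (by omega)]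
            simp only [List.length_take, List.length_drop]
            omega
          have hlen4' : PySem.Str.len (String.ofList (PySem.List.slice msg.toList
              (some ((t : Int) + 2 * j)) (some ((t : Int) + 2 * j + 4)))) ≠ 4 := by
            have he : PySem.Str.len (String.ofList (PySem.List.slice msg.toList
                (some ((t : Int) + 2 * j)) (some ((t : Int) + 2 * j + 4))))
                = (((PySem.List.slice msg.toList (some ((t : Int) + 2 * j))
                  (some ((t : Int) + 2 * j + 4))).length : Nat) : Int) := by
              simp [PySem.Str.len_eq]
            rw [he, hlentok]
            omega
          rw [show pvDecompA (f + 1) (String.ofList (PySem.List.slice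
              msg.toList (some ((t : Int) + 2 * j)) (some ((t : Int) + 2 * j + 4)))) msg
              = pvDecompStep (fun tk => pvDecompA f tk msg) (String.ofList (PySem.List.slice
              msg.toList (some ((t : Int) + 2 * j)) (some ((t : Int) + 2 * j + 4)))) msg from rfl]
          rw [show pvChaseB msg.toList (f + 1)
              (acc ++ PySem.List.slice msg.toList (some (t : Int)) (some ((t : Int) + 2 * j)))
              (String.ofList (PySem.List.slice msg.toList (some ((t : Int) + 2 * j))
                (some ((t : Int) + 2 * j + 4))))
              = pvChaseStep (pvChaseB msg.toList f) msg.toList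
              (acc ++ PySem.List.slice msg.toList (some (t : Int)) (some ((t : Int) + 2 * j)))
              (String.ofList (PySem.List.slice msg.toList (some ((t : Int) + 2 * j))
                (some ((t : Int) + 2 * j + 4)))) from rfl]
          unfold pvDecompStep pvChaseStep
          rw [if_pos hlen4', if_pos hlen4']
          simp [List.append_assoc]
        · rw [if_neg hch, if_neg hch]
          simp


-- ===== VERDICT (by name: the statement is the Claim_ definition above) =====
theorem decompress_four_bytes_spec : Claim_equal_decompress_four_bytes := by
  intro fb msg _ hpre
  show decompress_four_bytes fb msg = decompress_four_bytes_alt fb msg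
  unfold decompress_four_bytes decompress_four_bytes_alt
  rcases hpre with hlen | ⟨hv0, hgoodB, hdecB, hwfB⟩
  · rw [show pvDecompA 4097 fb msg
        = pvDecompStep (fun tk => pvDecompA 4096 tk msg) fb msg from rfl]
    rw [show pvChaseB msg.toList 4097 [] fb
        = pvChaseStep (pvChaseB msg.toList 4096) msg.toList [] fb from rfl]
    unfold pvDecompStep pvChaseStep
    rw [if_pos hlen, if_pos hlen]
    simp
  · by_cases hlen : PySem.Str.len fb ≠ 4
    · rw [show pvDecompA 4097 fb msg
          = pvDecompStep (fun tk => pvDecompA 4096 tk msg) fb msg from rfl]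
      rw [show pvChaseB msg.toList 4097 [] fb
          = pvChaseStep (pvChaseB msg.toList 4096) msg.toList [] fb from rfl]
      unfold pvDecompStep pvChaseStep
      rw [if_pos hlen, if_pos hlen]
      simp
    · have hgood := pvGoodB_to msg.toList _ hgoodB
      have hdec := pvDecB_to msg.toList _ hdecB
      have hwf := pvWFB_to msg.toList hwfB
      have hp : PySem.Int.ofStrBase? (PySem.Str.slice fb (some (-3)) none) 16
          = some (((pvPtr fb).toNat : Int)) := by
        rw [pvPtr_some fb hv0, Int.toNat_of_nonneg hv0]
      have := pvMain msg hwf 4097 [] fb (pvPtr fb).toNat hlen hp hgood hdec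
        (by have := hgood.1; omega)
      rw [this]
      simp
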